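-- pv_equiv track=rewrite | github.com/joshanashakya/dissertation | workspace/dataset/java-python/GeeksForGeeks/2192/A/2.py | totalPairs
-- ===== SOURCE A (Python) =====
-- def uglyNumber(n):
--
--     # To store ugly numbers
--     ugly = [None] * n
--     i2 = i3 = i5 = 0
--     next_multiple_of_2 = 2
--     next_multiple_of_3 = 3
--     next_multiple_of_5 = 5
--     next_ugly_no = 1
--
--     ugly[0] = 1
--     for i in range(1, n):
--         next_ugly_no = min(next_multiple_of_2,
--                         min(next_multiple_of_3,
--                             next_multiple_of_5))
--         ugly[i] = next_ugly_no
--         if (next_ugly_no == next_multiple_of_2):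
--             i2 = i2 + 1
--             next_multiple_of_2 = ugly[i2] * 2
--
--         if (next_ugly_no == next_multiple_of_3):
--             i3 = i3 + 1
--             next_multiple_of_3 = ugly[i3] * 3
--
--         if (next_ugly_no == next_multiple_of_5):
--             i5 = i5 + 1
--             next_multiple_of_5 = ugly[i5] * 5
--
--     return next_ugly_no
--
-- def totalPairs(arr1, arr2, n, m):
--
--     s1 = set()
--     i = 1
--
--     # Insert ugly numbers in set
--     # which are less than 1000
--     while True:
--         next_ugly_number = uglyNumber(i)
--         if (next_ugly_number > 1000):
--             break
--         s1.add(next_ugly_number)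
--         i += 1
--
--     # Set is used to avoid duplicate pairs
--     s2 = set()
--
--     for i in range(0, n):
--
--         # Check if arr1[i] is an ugly number
--         if arr1[i] in s1:
--
--             for j in range(0, m):
--
--                 # Check if arr2[i] is an ugly number
--                 if arr2[j] in s1:
--                     if (arr1[i] < arr2[j]):
--                         s2.add((arr1[i], arr2[j]))
--                     else:
--                         s2.add((arr2[j], arr1[i]))
--
--     # Return the size of the set s2
--     return len(s2)
-- ===== SOURCE B (Python) =====
-- def totalPairs(arr1, arr2, n, m):
--     def is_ugly(x):
--         if x < 1 or x > 1000:
--             return False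
--         for p in (2, 3, 5):
--             while x % p == 0:
--                 x //= p
--         return x == 1
--
--     u1 = [a for a in arr1[:max(n, 0)] if is_ugly(a)]
--     u2 = [b for b in arr2[:max(m, 0)] if is_ugly(b)]
--     pairs = {(min(a, b), max(a, b)) for a in u1 for b in u2}
--     return len(pairs)
-- ===== Notes on version B (the rewrite author's own statement) =====
-- stated objective: simpler
-- what changed: B drops A's DP min-merge ugly-number generator and the precomputed set s1, testing each prefix element directly by trial division (divide out 2, 3, 5 and check the residue is 1, within [1,1000]) and collecting (min,max) pairs from the two filtered prefixes into a set.
import Mathlib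
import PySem

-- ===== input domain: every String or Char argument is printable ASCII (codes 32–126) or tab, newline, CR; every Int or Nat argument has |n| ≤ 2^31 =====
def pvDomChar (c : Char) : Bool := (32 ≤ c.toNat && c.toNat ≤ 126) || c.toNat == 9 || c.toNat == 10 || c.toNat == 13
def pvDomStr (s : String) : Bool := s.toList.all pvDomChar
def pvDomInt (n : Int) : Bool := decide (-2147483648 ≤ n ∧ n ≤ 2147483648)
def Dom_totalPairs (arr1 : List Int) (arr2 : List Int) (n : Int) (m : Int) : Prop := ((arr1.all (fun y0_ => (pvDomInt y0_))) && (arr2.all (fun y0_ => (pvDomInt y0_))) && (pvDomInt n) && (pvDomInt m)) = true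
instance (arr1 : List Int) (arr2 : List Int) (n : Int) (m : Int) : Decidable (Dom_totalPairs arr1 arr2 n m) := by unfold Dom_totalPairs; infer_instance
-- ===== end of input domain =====

-- B replaces A's DP ugly-number generator + precomputed set with a direct trial-division
-- ugliness test over sliced prefixes; equal return values on Pre_ (alternative decomposition).

-- ===== PORT A =====
-- the for-loop of uglyNumber: state (ugly list, i2, i3, i5, multiples, next_ugly_no)
def uglyLoop (ugly : List Int) (i2 i3 i5 : Nat) (m2 m3 m5 next : Int) : Nat → Int
  | 0 => next
  | steps + 1 =>
    let next := min m2 (min m3 m5)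
    let ugly := ugly ++ [next]
    -- Python reads ugly[i2+1] etc.; indices are always in range, getD 0 is a totality guard
    let p2 := if next = m2 then (i2 + 1, (ugly.getD (i2 + 1) 0) * 2) else (i2, m2)
    let p3 := if next = m3 then (i3 + 1, (ugly.getD (i3 + 1) 0) * 3) else (i3, m3)
    let p5 := if next = m5 then (i5 + 1, (ugly.getD (i5 + 1) 0) * 5) else (i5, m5)
    uglyLoop ugly p2.1 p3.1 p5.1 p2.2 p3.2 p5.2 next steps

def uglyNumber (n : Int) : Int :=
  -- Python raises (IndexError on ugly[0]) for n ≤ 0; A only calls n ≥ 1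
  if n ≤ 0 then 0 else uglyLoop [1] 0 0 0 2 3 5 1 (n.toNat - 1)

-- the 'while True' loop filling s1; ugly numbers exceed 1000 long before 200 iterations,
-- so the fuel is a pure totality guard (the loop is input-independent)
def buildS1 : Nat → PySem.Set Int → Nat → PySem.Set Int
  | _, s1, 0 => s1
  | i, s1, fuel + 1 =>
    let next := uglyNumber (Int.ofNat i)
    if next > 1000 then s1 else buildS1 (i + 1) (PySem.Set.add s1 next) fuel

def totalPairs (arr1 : List Int) (arr2 : List Int) (n : Int) (m : Int) : Int :=
  let s1 : PySem.Set Int := buildS1 1 PySem.Set.empty 200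
  let s2 : PySem.Set (Int × Int) :=
    (PySem.List.pyRange 0 n 1).foldl (fun s2 i =>
      let a := PySem.List.pyGetD arr1 i 0
      if PySem.Set.contains s1 a then
        (PySem.List.pyRange 0 m 1).foldl (fun s2 j =>
          let b := PySem.List.pyGetD arr2 j 0
          if PySem.Set.contains s1 b then
            if a < b then PySem.Set.add s2 (a, b) else PySem.Set.add s2 (b, a)
          else s2) s2
      else s2) PySem.Set.empty
  Int.ofNat s2.length

-- ===== PORT B =====
-- while x % p == 0: x //= p   (fuel 10: at most 9 divisions are possible for 1 ≤ x ≤ 1000)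
def divOut (x p : Int) : Nat → Int
  | 0 => x
  | fuel + 1 => if PySem.Int.mod x p = 0 then divOut (PySem.Int.floordiv x p) p fuel else x

def isUgly (x : Int) : Bool :=
  if x < 1 ∨ x > 1000 then false
  else
    let x := divOut x 2 10
    let x := divOut x 3 10
    let x := divOut x 5 10
    x == 1

def totalPairs_alt (arr1 : List Int) (arr2 : List Int) (n : Int) (m : Int) : Int :=
  let u1 := (arr1.take (max n 0).toNat).filter isUgly
  let u2 := (arr2.take (max m 0).toNat).filter isUgly
  let pairs : PySem.Set (Int × Int) :=
    u1.foldl (fun s a => u2.foldl (fun s b => PySem.Set.add s (min a b, max a b)) s) PySem.Set.empty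
  Int.ofNat pairs.length

-- ===== PRECONDITION & SPEC =====
-- the ugly numbers in [1, 1000] (the constant set A computes); used only to state Pre_
def uglyList : List Int :=
  [1, 2, 3, 4, 5, 6, 8, 9, 10, 12, 15, 16, 18, 20, 24, 25, 27, 30, 32, 36, 40, 45, 48, 50,
   54, 60, 64, 72, 75, 80, 81, 90, 96, 100, 108, 120, 125, 128, 135, 144, 150, 160, 162,
   180, 192, 200, 216, 225, 240, 243, 250, 256, 270, 288, 300, 320, 324, 360, 375, 384,
   400, 405, 432, 450, 480, 486, 500, 512, 540, 576, 600, 625, 640, 648, 675, 720, 729,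
   750, 768, 800, 810, 864, 900, 960, 972, 1000]

-- Pre_ excludes exactly the inputs where A raises IndexError: n beyond len(arr1), or some
-- ugly element in arr1[:n] while m exceeds len(arr2) (only then the inner loop runs).
def Pre_totalPairs (arr1 : List Int) (arr2 : List Int) (n : Int) (m : Int) : Prop :=
  n ≤ arr1.length ∧ ((∃ x ∈ arr1.take n.toNat, x ∈ uglyList) → m ≤ arr2.length)
instance (arr1 : List Int) (arr2 : List Int) (n : Int) (m : Int) : Decidable (Pre_totalPairs arr1 arr2 n m) := by unfold Pre_totalPairs; infer_instance

def pvWitness_totalPairs : List Int × List Int × Int × Int := ([2, 7], [3, 3], 2, 2)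

def Spec_totalPairs (arr1 : List Int) (arr2 : List Int) (n : Int) (m : Int) (out : Int) : Prop := out = totalPairs_alt arr1 arr2 n m
instance (arr1 : List Int) (arr2 : List Int) (n : Int) (m : Int) (out : Int) : Decidable (Spec_totalPairs arr1 arr2 n m out) := by unfold Spec_totalPairs; infer_instance

-- ===== CLAIM (what is proved, stated in full; the proofs are below) =====
def Claim_equal_totalPairs : Prop := ∀ (arr1 : List Int) (arr2 : List Int) (n : Int) (m : Int), Dom_totalPairs arr1 arr2 n m → Pre_totalPairs arr1 arr2 n m → Spec_totalPairs arr1 arr2 n m (totalPairs arr1 arr2 n m)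

-- ===== LEMMAS AND PROOFS =====
-- A's constant set s1 evaluates to the literal list of ugly numbers ≤ 1000
set_option maxRecDepth 100000 in
theorem s1_eq : buildS1 1 PySem.Set.empty 200 = uglyList := by decide

-- the membership test A performs agrees with B's trial-division test, on every Int
set_option maxRecDepth 100000 in
theorem contains_uglyList_bounded :
    ∀ x ∈ Finset.Icc (1 : Int) 1000, PySem.Set.contains uglyList x = isUgly x := by decide

theorem uglyList_range : ∀ y ∈ uglyList, 1 ≤ y ∧ y ≤ 1000 := by decide

theorem contains_uglyList (x : Int) : PySem.Set.contains uglyList x = isUgly x := by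
  by_cases h : 1 ≤ x ∧ x ≤ 1000
  · exact contains_uglyList_bounded x (Finset.mem_Icc.mpr h)
  · have hx : x < 1 ∨ x > 1000 := by omega
    have h1 : PySem.Set.contains uglyList x = false := by
      rw [Bool.eq_false_iff]
      intro hc
      have := uglyList_range x (List.mem_of_elem_eq_true hc)
      omega
    have h2 : isUgly x = false := by
      unfold isUgly
      rw [if_pos hx]
    rw [h1, h2]

-- index loop over a prefix 'for i in range(0, t): … xs[i] …' is a fold over xs.take t.toNat
theorem fold_idx {β : Type} (xs : List Int) (t : Int) (ht : t ≤ xs.length)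
    (f : β → Int → β) (init : β) :
    (PySem.List.pyRange 0 t 1).foldl (fun s i => f s (PySem.List.pyGetD xs i 0)) init
      = (xs.take t.toNat).foldl f init := by
  by_cases h : t ≤ 0
  · rw [PySem.List.pyRange_one_eq_nil h]
    have h0 : t.toNat = 0 := by omega
    simp [h0]
  · have hlen : ((xs.take t.toNat).length : Int) = t := by
      simp [List.length_take]
      omega
    have key := PySem.List.foldl_pyRange_zero_pyGetD' (xs.take t.toNat) 0 f init
    rw [hlen] at key
    rw [← key]
    apply PySem.List.foldl_congr_mem
    intro acc i hi
    have hi' := (PySem.List.mem_pyRange_one).mp hi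
    congr 1
    have h0 : (0 : Int) ≤ i := hi'.1
    have h1 : i < (xs.length : Int) := by omega
    have h2 : i < ((xs.take t.toNat).length : Int) := by simp [List.length_take]; omega
    rw [PySem.List.pyGetD_eq_getElem xs 0 h0 h1,
        PySem.List.pyGetD_eq_getElem (xs.take t.toNat) 0 h0 h2]
    exact (List.getElem_take).symm

theorem minmax_add (s : PySem.Set (Int × Int)) (a b : Int) :
    (if a < b then PySem.Set.add s (a, b) else PySem.Set.add s (b, a))
      = PySem.Set.add s (min a b, max a b) := by
  rcases lt_or_ge a b with h | h
  · rw [if_pos h, min_eq_left (le_of_lt h), max_eq_right (le_of_lt h)]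
  · rw [if_neg (not_lt.mpr h), min_eq_right h, max_eq_left h]

-- ===== VERDICT (by name: the statement is the Claim_ definition above) =====
theorem totalPairs_spec : Claim_equal_totalPairs := by
  intro arr1 arr2 n m _ hpre
  obtain ⟨hn, hm⟩ := hpre
  unfold Spec_totalPairs totalPairs totalPairs_alt
  rw [s1_eq]
  simp only [contains_uglyList]
  have hmax1 : (max n 0).toNat = n.toNat := by omega
  have hmax2 : (max m 0).toNat = m.toNat := by omega
  rw [hmax1, hmax2]
  congr 1
  rw [fold_idx arr1 n hn
      (fun s2 a => if isUgly a = true then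
        (PySem.List.pyRange 0 m 1).foldl (fun s2 j =>
          if isUgly (PySem.List.pyGetD arr2 j 0) = true then
            if a < PySem.List.pyGetD arr2 j 0 then PySem.Set.add s2 (a, PySem.List.pyGetD arr2 j 0)
            else PySem.Set.add s2 (PySem.List.pyGetD arr2 j 0, a)
          else s2) s2
      else s2) PySem.Set.empty]
  simp only [List.foldl_filter]
  congr 1
  apply PySem.List.foldl_congr_mem
  intro acc a hmem
  by_cases hu : isUgly a = true
  · simp only [hu, if_true]
    have hm' : m ≤ arr2.length := by
      apply hm
      refine ⟨a, hmem, ?_⟩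
    --   a ∈ uglyList from isUgly a via contains_uglyList
      have hc : PySem.Set.contains uglyList a = true := by rw [contains_uglyList]; exact hu
      exact List.mem_of_elem_eq_true hc
    rw [fold_idx arr2 m hm'
        (fun s2 b => if isUgly b = true then
          if a < b then PySem.Set.add s2 (a, b) else PySem.Set.add s2 (b, a)
        else s2) acc]
    apply PySem.List.foldl_congr_mem
    intro acc2 b _
    by_cases hb : isUgly b = true
    · simp only [hb, if_true]
      exact minmax_add acc2 a b
    · simp [hb]
  · simp [hu]
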